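-- pv_equiv track=rewrite | github.com/RealForce1024/flask-echarts | test.py | split_v1
-- ===== SOURCE A (Python) =====
-- def split_v1(list):
--     length = len(list)
--     collection = []
--     for i in range(length - 1):
--         lst = []
--         for j in range(length - 1 - i):
--             if list[j] == list[j + 1]:
--                 lst.append(list[j])
--         collection.append(lst)
--     return collection
-- ===== SOURCE B (Python) =====
-- def split_v1(list):
--     n = len(list)
--     # positions j of consecutive-equal pairs, with their values, computed once
--     matches = [(j, list[j]) for j in range(n - 1) if list[j] == list[j + 1]]
--     collection = []
--     for i in range(n - 1):
--         cutoff = n - 1 - i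
--         prefix = []
--         for j, v in matches:
--             if j >= cutoff:
--                 break
--             prefix.append(v)
--         collection.append(prefix)
--     return collection
-- ===== Notes on version B (the rewrite author's own statement) =====
-- stated objective: alternative
-- what changed: B precomputes the list of consecutive-equal positions once and emits each row as a cutoff-bounded prefix of that list, instead of re-scanning the whole input for every row.
import Mathlib
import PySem

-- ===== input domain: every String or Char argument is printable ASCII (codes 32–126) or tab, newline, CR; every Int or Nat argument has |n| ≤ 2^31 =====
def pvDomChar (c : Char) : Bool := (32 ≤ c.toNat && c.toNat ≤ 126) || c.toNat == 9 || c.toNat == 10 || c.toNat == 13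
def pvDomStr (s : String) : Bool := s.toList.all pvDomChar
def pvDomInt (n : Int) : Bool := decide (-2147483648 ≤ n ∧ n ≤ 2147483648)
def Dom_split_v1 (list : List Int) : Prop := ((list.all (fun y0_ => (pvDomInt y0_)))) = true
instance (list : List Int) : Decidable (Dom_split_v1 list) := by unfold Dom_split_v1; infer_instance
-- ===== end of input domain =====

-- B computes the consecutive-equal positions once and emits each row as a cutoff-bounded
-- prefix of that list, instead of re-scanning the input per row (objective: alternative).


-- ===== PORT A =====
def split_v1 (list : List Int) : List (List Int) :=
  let length : Int := list.length
  (PySem.List.pyRange 0 (length - 1) 1).foldl (fun collection i =>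
    let lst := (PySem.List.pyRange 0 (length - 1 - i) 1).foldl (fun lst j =>
      if PySem.List.pyGetD list j 0 = PySem.List.pyGetD list (j + 1) 0 then
        lst ++ [PySem.List.pyGetD list j 0]
      else lst) []
    collection ++ [lst]) []

-- ===== PORT B =====
-- the inner 'for j, v in matches: if j >= cutoff: break; prefix.append(v)' loop of Source B
def pvTakePrefix (cutoff : Int) : List (Int × Int) → List Int
  | [] => []
  | (j, v) :: rest => if j ≥ cutoff then [] else v :: pvTakePrefix cutoff rest

def split_v1_alt (list : List Int) : List (List Int) :=
  let n : Int := list.length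
  let ms : List (Int × Int) :=
    (PySem.List.pyRange 0 (n - 1) 1).foldl (fun m j =>
      if PySem.List.pyGetD list j 0 = PySem.List.pyGetD list (j + 1) 0 then
        m ++ [(j, PySem.List.pyGetD list j 0)]
      else m) []
  (PySem.List.pyRange 0 (n - 1) 1).foldl (fun collection i =>
    let cutoff := n - 1 - i
    collection ++ [pvTakePrefix cutoff ms]) []

-- ===== PRECONDITION & SPEC =====
def Spec_split_v1 (list : List Int) (out : List (List Int)) : Prop := out = split_v1_alt list
instance (list : List Int) (out : List (List Int)) : Decidable (Spec_split_v1 list out) := by unfold Spec_split_v1; infer_instance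

-- ===== CLAIM (what is proved, stated in full; the proofs are below) =====
def Claim_equal_split_v1 : Prop := ∀ (list : List Int), Dom_split_v1 list → Spec_split_v1 list (split_v1 list)

-- ===== LEMMAS AND PROOFS =====

theorem pvTakePrefix_append_of_lt (c : Int) (xs ys : List (Int × Int))
    (h : ∀ x ∈ xs, x.1 < c) :
    pvTakePrefix c (xs ++ ys) = xs.map (·.2) ++ pvTakePrefix c ys := by
  induction xs with
  | nil => simp
  | cons a xs ih =>
    obtain ⟨j, v⟩ := a
    have hj : j < c := h (j, v) (by simp)
    simp [pvTakePrefix, not_le.mpr hj, ih (fun x hx => h x (by simp [hx]))]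

theorem pvTakePrefix_eq_nil_of_ge (c : Int) (ys : List (Int × Int))
    (h : ∀ y ∈ ys, c ≤ y.1) :
    pvTakePrefix c ys = [] := by
  cases ys with
  | nil => rfl
  | cons a ys =>
    obtain ⟨j, v⟩ := a
    have hj : c ≤ j := h (j, v) (by simp)
    simp [pvTakePrefix, hj]

theorem split_v1_spec : Claim_equal_split_v1 := by
  intro list _
  unfold Spec_split_v1 split_v1 split_v1_alt
  simp only []
  set n : Int := (list.length : Int) with hn
  set p : Int → Prop := fun j => PySem.List.pyGetD list j 0 = PySem.List.pyGetD list (j + 1) 0 with hp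
  -- rewrite A's outer loop and B's outer loop to maps, and the match-collecting folds to filters
  rw [PySem.List.foldl_append_singleton_eq_map
        (f := fun i => (PySem.List.pyRange 0 (n - 1 - i) 1).foldl (fun lst j =>
          if PySem.List.pyGetD list j 0 = PySem.List.pyGetD list (j + 1) 0 then
            lst ++ [PySem.List.pyGetD list j 0] else lst) []),
      PySem.List.foldl_append_singleton_eq_map
        (f := fun i => pvTakePrefix (n - 1 - i)
          ((PySem.List.pyRange 0 (n - 1) 1).foldl (fun m j =>
            if PySem.List.pyGetD list j 0 = PySem.List.pyGetD list (j + 1) 0 then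
              m ++ [(j, PySem.List.pyGetD list j 0)] else m) []))]
  simp only [List.nil_append]
  apply List.map_congr_left
  intro i hi
  have hi' := (PySem.List.mem_pyRange_one).mp hi
  set c : Int := n - 1 - i with hc
  have hc1 : 0 < c := by omega
  have hc2 : c ≤ n - 1 := by omega
  rw [PySem.List.foldl_append_ite (p := fun j => PySem.List.pyGetD list j 0 = PySem.List.pyGetD list (j + 1) 0)
        (f := fun j => PySem.List.pyGetD list j 0),
      PySem.List.foldl_append_ite (p := fun j => PySem.List.pyGetD list j 0 = PySem.List.pyGetD list (j + 1) 0)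
        (f := fun j => (j, PySem.List.pyGetD list j 0))]
  simp only [List.nil_append]
  rw [PySem.List.pyRange_one_append 0 c (n - 1) (by omega) hc2, List.filter_append, List.map_append]
  rw [pvTakePrefix_append_of_lt]
  · rw [pvTakePrefix_eq_nil_of_ge]
    · simp [List.map_map, Function.comp]
    · intro y hy
      simp only [List.mem_map, List.mem_filter] at hy
      obtain ⟨j, ⟨hjmem, _⟩, rfl⟩ := hy
      exact ((PySem.List.mem_pyRange_one).mp hjmem).1
  · intro x hx
    simp only [List.mem_map, List.mem_filter] at hx
    obtain ⟨j, ⟨hjmem, _⟩, rfl⟩ := hx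
    exact ((PySem.List.mem_pyRange_one).mp hjmem).2
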